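-- pv_equiv track=rewrite | github.com/Viguitars/TUP-UTN | Primer Semestre/Programacion I/16_trabajo_practico_6/functions.py | generate_count_tuples
-- ===== SOURCE A (Python) =====
-- def generate_count_tuples(list):
--     # Se inicializa un diccionario en donde se contaran las ocurrencias
--     count_dict = {}
--     # Se itera sobre cada item de la lista
--     for number in list:
--         # Si el item ya esta en la lista se suma una ocurrencia al valor de la clave
--         if number in count_dict:
--             count_dict[number] += 1
--         # Si no, se le da el valor de uno a la clave (item)
--         else:
--             count_dict[number] = 1
--     # Se crea la lista que contiene las tuplas con el item y ocurrencia
--     count_tuples = [(num, count) for num, count in count_dict.items()]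
--     return count_tuples
-- ===== SOURCE B (Python) =====
-- def generate_count_tuples(list):
--     # Phase 1: distinct values in first-occurrence order (set for O(1) membership).
--     seen = set()
--     distinct = []
--     for number in list:
--         if number not in seen:
--             seen.add(number)
--             distinct.append(number)
--     # Phase 2: count each distinct value with list.count.
--     return [(v, list.count(v)) for v in distinct]
-- ===== Notes on version B (the rewrite author's own statement) =====
-- stated objective: alternative
-- what changed: Replaces the single accumulating dict pass with a two-phase strategy: first collect distinct values in first-occurrence order, then re-scan the list with list.count for each distinct value.
import Mathlib
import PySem

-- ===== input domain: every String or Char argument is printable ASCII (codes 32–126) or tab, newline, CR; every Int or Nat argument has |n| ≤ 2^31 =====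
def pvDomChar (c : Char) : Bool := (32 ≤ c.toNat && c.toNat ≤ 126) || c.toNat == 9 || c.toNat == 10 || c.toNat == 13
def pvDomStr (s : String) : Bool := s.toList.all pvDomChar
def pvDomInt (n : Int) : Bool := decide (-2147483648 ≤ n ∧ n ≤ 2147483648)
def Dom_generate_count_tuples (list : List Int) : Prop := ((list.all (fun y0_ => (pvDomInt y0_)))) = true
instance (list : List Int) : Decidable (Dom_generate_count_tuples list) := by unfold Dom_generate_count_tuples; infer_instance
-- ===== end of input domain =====

-- B replaces A's single accumulating dict pass by a two-phase strategy (distinct values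
-- in first-occurrence order, then list.count for each); objective: alternative.


-- ===== PORT A =====
def generate_count_tuples (list : List Int) : List (Int × Int) :=
  let count_dict : PySem.Dict Int Int :=
    list.foldl (fun d number =>
      if d.contains number then d.insert number (d.getD number 0 + 1)
      else d.insert number 1) PySem.Dict.empty
  count_dict.items.map (fun p => (p.1, p.2))

-- ===== PORT B =====
def generate_count_tuples_alt (list : List Int) : List (Int × Int) :=
  let p : PySem.Set Int × List Int :=
    list.foldl (fun p number =>
      if PySem.Set.contains p.1 number then p
      else (PySem.Set.add p.1 number, p.2 ++ [number])) (PySem.Set.empty, [])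
  p.2.map (fun v => (v, (list.count v : Int)))

-- ===== PRECONDITION & SPEC =====
def Spec_generate_count_tuples (list : List Int) (out : List (Int × Int)) : Prop := out = generate_count_tuples_alt list
instance (list : List Int) (out : List (Int × Int)) : Decidable (Spec_generate_count_tuples list out) := by unfold Spec_generate_count_tuples; infer_instance

-- ===== CLAIM (what is proved, stated in full; the proofs are below) =====
def Claim_equal_generate_count_tuples : Prop := ∀ (list : List Int), Dom_generate_count_tuples list → Spec_generate_count_tuples list (generate_count_tuples list)

-- ===== LEMMAS AND PROOFS =====

-- A's counting loop is the Counter loop: the contains-branch is redundant because getD defaults to 0.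
theorem countLoop_eq_counter (l : List Int) :
    l.foldl (fun (d : PySem.Dict Int Int) number =>
      if d.contains number then d.insert number (d.getD number 0 + 1)
      else d.insert number 1) PySem.Dict.empty = PySem.Dict.counter l := by
  rw [← PySem.Dict.foldl_insert_getD_add_one_eq_counter]
  congr 1
  funext d n
  by_cases h : d.contains n = true
  · rw [if_pos h]
  · have h' : d.contains n = false := by simpa using h
    rw [if_neg h, PySem.Dict.getD_of_not_contains d 0 h']
    norm_num

-- one step of B's loop on a pair (s, s) is one Set.add on both components
theorem step_eq (s : PySem.Set Int) (x : Int) :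
    (if PySem.Set.contains s x then ((s, s) : PySem.Set Int × List Int)
     else (PySem.Set.add s x, s ++ [x]))
    = (PySem.Set.add s x, PySem.Set.add s x) := by
  by_cases h : PySem.Set.contains s x = true
  · rw [if_pos h, PySem.Set.add_of_mem ((PySem.Set.contains_iff s x).mp h)]
  · have hn : x ∉ s := fun hm => h ((PySem.Set.contains_iff s x).mpr hm)
    rw [if_neg h, PySem.Set.add_of_not_mem hn]

-- B's loop keeps seen = distinct; both components equal the Set.add fold.
theorem distinctLoop_eq (l : List Int) (s : PySem.Set Int) :
    l.foldl (fun (p : PySem.Set Int × List Int) number =>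
      if PySem.Set.contains p.1 number then p
      else (PySem.Set.add p.1 number, p.2 ++ [number])) (s, s)
    = (l.foldl PySem.Set.add s, l.foldl PySem.Set.add s) := by
  induction l generalizing s with
  | nil => rfl
  | cons x xs ih =>
    simp only [List.foldl_cons, step_eq]
    exact ih (PySem.Set.add s x)

-- from the empty start, B's loop computes set(list) in both components
theorem distinctLoop_empty (l : List Int) :
    l.foldl (fun (p : PySem.Set Int × List Int) number =>
      if PySem.Set.contains p.1 number then p
      else (PySem.Set.add p.1 number, p.2 ++ [number])) (PySem.Set.empty, [])
    = (PySem.Set.ofList l, PySem.Set.ofList l) := by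
  rw [PySem.Set.ofList_eq_foldl]
  exact distinctLoop_eq l []

-- ===== VERDICT (by name: the statement is the Claim_ definition above) =====
theorem generate_count_tuples_spec : Claim_equal_generate_count_tuples := by
  intro list _
  unfold Spec_generate_count_tuples generate_count_tuples generate_count_tuples_alt
  simp only [countLoop_eq_counter, distinctLoop_empty, PySem.Dict.items_counter]
  simp
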